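-- pv_equiv track=rewrite | github.com/scholnicks/scripts | pycleaner.py | countTrailingBlankLines
-- ===== SOURCE A (Python) =====
-- def countTrailingBlankLines(lines):
--     """Returns the number of trailing blank lines"""
--     count = 0
--     for line in reversed(lines):
--         line = line.rstrip()
--         if line:
--             break
--         else:
--             count = count + 1
--
--     return count
-- ===== SOURCE B (Python) =====
-- def countTrailingBlankLines(lines):
--     """Returns the number of trailing blank lines"""
--     last = -1
--     for i, line in enumerate(lines):
--         if line.rstrip():
--             last = i
--     return len(lines) - 1 - last
-- ===== Notes on version B (the rewrite author's own statement) =====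
-- stated objective: alternative
-- what changed: Replaces A's backward early-terminating count over reversed(lines) with a single forward pass that tracks the index of the last non-blank line and derives the count arithmetically as len(lines) - 1 - last.
import Mathlib
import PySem

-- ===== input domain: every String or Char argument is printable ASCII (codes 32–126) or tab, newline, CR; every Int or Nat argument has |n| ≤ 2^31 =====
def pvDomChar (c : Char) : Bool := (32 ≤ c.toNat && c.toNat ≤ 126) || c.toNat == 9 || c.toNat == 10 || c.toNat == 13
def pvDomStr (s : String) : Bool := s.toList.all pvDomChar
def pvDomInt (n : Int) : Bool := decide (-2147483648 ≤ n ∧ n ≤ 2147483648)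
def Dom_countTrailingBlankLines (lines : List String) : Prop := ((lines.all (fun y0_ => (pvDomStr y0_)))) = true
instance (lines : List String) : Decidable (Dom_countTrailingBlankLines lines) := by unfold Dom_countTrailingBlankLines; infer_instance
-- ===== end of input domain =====

-- B changes the algorithm: one forward pass tracking the last non-blank index instead of A's
-- backward early-terminating count; same O(n) cost (objective: alternative).

-- ===== PORT A =====
-- A's loop over reversed(lines): count blanks until the first non-blank (break).
def ctblLoopA : List String → Int
  | [] => 0
  | l :: rest => if PySem.Str.rstrip l ≠ "" then 0 else 1 + ctblLoopA rest

def countTrailingBlankLines (lines : List String) : Int :=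
  ctblLoopA lines.reverse

-- ===== PORT B =====
def countTrailingBlankLines_alt (lines : List String) : Int :=
  let last := (PySem.List.enumerate lines).foldl
    (fun acc p => if PySem.Str.rstrip p.2 ≠ "" then p.1 else acc) (-1)
  (lines.length : Int) - 1 - last

-- ===== PRECONDITION & SPEC =====
def Spec_countTrailingBlankLines (lines : List String) (out : Int) : Prop := out = countTrailingBlankLines_alt lines
instance (lines : List String) (out : Int) : Decidable (Spec_countTrailingBlankLines lines out) := by unfold Spec_countTrailingBlankLines; infer_instance

-- ===== CLAIM (what is proved, stated in full; the proofs are below) =====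
def Claim_equal_countTrailingBlankLines : Prop := ∀ (lines : List String), Dom_countTrailingBlankLines lines → Spec_countTrailingBlankLines lines (countTrailingBlankLines lines)

-- ===== LEMMAS AND PROOFS =====

theorem ctbl_eq (lines : List String) :
    countTrailingBlankLines lines = countTrailingBlankLines_alt lines := by
  induction lines using List.reverseRecOn with
  | nil => decide
  | append_singleton xs x ih =>
    simp only [countTrailingBlankLines, countTrailingBlankLines_alt,
      List.reverse_append, List.reverse_singleton, List.singleton_append, ctblLoopA,
      PySem.List.enumerate_append, List.foldl_append, List.length_append,
      List.length_singleton] at ih ⊢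
    simp only [PySem.List.enumerate_cons, PySem.List.enumerate_nil, List.foldl_cons,
      List.foldl_nil]
    by_cases h : PySem.Str.rstrip x ≠ ""
    · simp [h]
    · simp only [h, if_false]
      push_cast
      omega

-- ===== VERDICT (by name: the statement is the Claim_ definition above) =====
theorem countTrailingBlankLines_spec : Claim_equal_countTrailingBlankLines := by
  intro lines _
  exact ctbl_eq lines
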